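-- pv_equiv track=rewrite | github.com/hankelvin/marta-v2 | 02_modelbuilding/01_code/a_preprocessor.py | __make_sorted_connslex
-- ===== SOURCE A (Python) =====
-- def __make_sorted_connslex(connslex):
--     """
--     Helper function to sort the canonical form of connectives by their first token (since connectives may be multi-word expressions), as well as well as the length of the entire connective.
--     """
--
--     # 1. create dictionary of dictionaries, containing lists. top-level key is first token of connective, second-level key is # tokens in connective.
--     sorted_connslex = {conn.split()[0].lower(): {} for conn in connslex}
--     [sorted_connslex[conn.split()[0].lower()].update({len(conn.split()):set()}) for conn in connslex]
--     # populate dictionary using list_comp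
--     [sorted_connslex[conn.split()[0].lower()][conn_length].add(conn.lower())  \
--     for conn in connslex \
--     for conn_length in sorted_connslex[conn.split()[0].lower()] \
--     if len(conn.split()) == conn_length]
--
--     return sorted_connslex
-- ===== SOURCE B (Python) =====
-- def __make_sorted_connslex(connslex):
--     """
--     Single-pass regrouping: one loop over connslex building the nested
--     dict directly, instead of three separate comprehension passes.
--     """
--     result = {}
--     for conn in connslex:
--         toks = conn.split()
--         tok = toks[0].lower()
--         length = len(toks)
--         inner = result.get(tok, {})
--         group = inner.get(length, set())
--         group.add(conn.lower())
--         inner[length] = group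
--         result[tok] = inner
--     return result
-- ===== Notes on version B (the rewrite author's own statement) =====
-- stated objective: simpler
-- what changed: A builds the nested dict in three comprehension passes (key scaffold, per-key length scaffold, then a population pass that rescans each inner length dict for the matching length); B builds the same nested dict in a single loop over connslex, updating the (first-token, token-count) group directly.
-- outside the precondition, e.g. on __make_sorted_connslex(['  ']): A raises IndexError, B raises IndexError
import Mathlib
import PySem

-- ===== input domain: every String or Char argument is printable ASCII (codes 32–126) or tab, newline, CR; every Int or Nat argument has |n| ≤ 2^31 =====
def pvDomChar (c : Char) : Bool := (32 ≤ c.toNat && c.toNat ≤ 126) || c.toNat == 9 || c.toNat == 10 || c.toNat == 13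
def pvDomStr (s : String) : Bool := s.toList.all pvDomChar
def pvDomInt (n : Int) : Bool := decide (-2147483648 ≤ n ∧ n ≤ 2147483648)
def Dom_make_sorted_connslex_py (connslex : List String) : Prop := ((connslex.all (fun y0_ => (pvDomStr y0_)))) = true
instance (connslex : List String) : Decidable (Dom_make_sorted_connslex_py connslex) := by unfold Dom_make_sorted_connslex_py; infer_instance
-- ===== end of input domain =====

-- B replaces A's three comprehension passes (key scaffold, length scaffold, then a
-- population pass that rescans each inner length dict) by a single loop that builds the
-- nested dict directly; objective: simpler (and one pass instead of three).

-- ===== PORT A =====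
-- conn.split()[0].lower()  (the [0] is total here; Pre_ excludes whitespace-only conns, where Python raises IndexError)
def pvFirstTok (conn : String) : String :=
  PySem.Str.lower (PySem.List.pyGetD (PySem.Str.split₀ conn) 0 "")

def make_sorted_connslex_py (connslex : List String) : List (String × List (Int × List String)) :=
  -- pass 1: {conn.split()[0].lower(): {} for conn in connslex}
  let d1 : PySem.Dict String (PySem.Dict Int (PySem.Set String)) :=
    connslex.foldl (fun d conn => d.insert (pvFirstTok conn) PySem.Dict.empty) PySem.Dict.empty
  -- pass 2: [sorted_connslex[...].update({len(conn.split()): set()}) for conn in connslex]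
  let d2 := connslex.foldl (fun d conn =>
      d.modify (pvFirstTok conn) PySem.Dict.empty
        (fun inner => inner.insert (PySem.List.len (PySem.Str.split₀ conn)) PySem.Set.empty)) d1
  -- pass 3: [....add(conn.lower()) for conn in connslex for conn_length in sorted_connslex[...] if len(conn.split()) == conn_length]
  let d3 := connslex.foldl (fun d conn =>
      ((d.getD (pvFirstTok conn) PySem.Dict.empty).keys).foldl (fun d' connLength =>
          if PySem.List.len (PySem.Str.split₀ conn) == connLength then
            d'.modify (pvFirstTok conn) PySem.Dict.empty
              (fun inner => inner.modify connLength PySem.Set.empty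
                (fun s => PySem.Set.add s (PySem.Str.lower conn)))
          else d') d) d2
  d3.items.map (fun p => (p.1, p.2.items))

-- ===== PORT B =====
def make_sorted_connslex_py_alt (connslex : List String) : List (String × List (Int × List String)) :=
  let result : PySem.Dict String (PySem.Dict Int (PySem.Set String)) :=
    connslex.foldl (fun d conn =>
      let toks := PySem.Str.split₀ conn
      let tok := PySem.Str.lower (PySem.List.pyGetD toks 0 "")
      let length := PySem.List.len toks
      let inner := d.getD tok PySem.Dict.empty
      let group := inner.getD length PySem.Set.empty
      let group := PySem.Set.add group (PySem.Str.lower conn)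
      let inner := inner.insert length group
      d.insert tok inner) PySem.Dict.empty
  result.items.map (fun p => (p.1, p.2.items))

-- ===== PRECONDITION & SPEC =====
-- Pre_ excludes exactly the connectives that are empty or whitespace-only, on which
-- Python A raises IndexError at conn.split()[0].
def Pre_make_sorted_connslex_py (connslex : List String) : Prop :=
  ∀ conn ∈ connslex, PySem.Str.split₀ conn ≠ []
instance (connslex : List String) : Decidable (Pre_make_sorted_connslex_py connslex) := by
  unfold Pre_make_sorted_connslex_py; infer_instance

def pvWitness_make_sorted_connslex_py : List String := ["and", "as long as", "AND", "but"]

def Spec_make_sorted_connslex_py (connslex : List String) (out : List (String × List (Int × List String))) : Prop := out = make_sorted_connslex_py_alt connslex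
instance (connslex : List String) (out : List (String × List (Int × List String))) : Decidable (Spec_make_sorted_connslex_py connslex out) := by unfold Spec_make_sorted_connslex_py; infer_instance

-- ===== CLAIM (what is proved, stated in full; the proofs are below) =====
def Claim_equal_make_sorted_connslex_py : Prop := ∀ (connslex : List String), Dom_make_sorted_connslex_py connslex → Pre_make_sorted_connslex_py connslex → Spec_make_sorted_connslex_py connslex (make_sorted_connslex_py connslex)

-- ===== LEMMAS AND PROOFS =====

-- the shared shape of every pass: a fold whose step touches only the entry at `key c`
def pvStep {κ ν α : Type} [BEq κ] (key : α → κ) (f : ν → α → ν) (d0 : ν)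
    (d : PySem.Dict κ ν) (c : α) : PySem.Dict κ ν :=
  d.insert (key c) (f (d.getD (key c) d0) c)

-- the lookup at K of such a fold is the fold of f over the K-group
lemma getD_foldl_pvStep {κ ν α : Type} [BEq κ] [LawfulBEq κ] [DecidableEq κ]
    (l : List α) (key : α → κ) (f : ν → α → ν) (d0 : ν) (d : PySem.Dict κ ν) (K : κ) :
    (l.foldl (pvStep key f d0) d).getD K d0
      = (l.filter (fun c => key c == K)).foldl f (d.getD K d0) := by
  induction l generalizing d with
  | nil => rfl
  | cons c l ih =>
      simp only [List.foldl_cons, List.filter_cons]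
      by_cases h : key c = K
      · have hb : (key c == K) = true := by simp [h]
        rw [hb, if_pos rfl, List.foldl_cons, ih]
        have : (pvStep key f d0 d c).getD K d0 = f (d.getD K d0) c := by
          simp [pvStep, h]
        rw [this]
      · have hb : (key c == K) = false := by simp [h]
        rw [hb, if_neg (by simp), ih]
        have : (pvStep key f d0 d c).getD K d0 = d.getD K d0 := by
          simp [pvStep, PySem.Dict.getD_insert]
          intro hKk; exact absurd hKk.symm h
        rw [this]

lemma keys_foldl_pvStep {κ ν α : Type} [BEq κ] [LawfulBEq κ]
    (l : List α) (key : α → κ) (f : ν → α → ν) (d0 : ν) (d : PySem.Dict κ ν) :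
    (l.foldl (pvStep key f d0) d).keys = PySem.Set.update d.keys (l.map key) :=
  PySem.Dict.keys_foldl_insert_key l key (fun d c => f (d.getD (key c) d0) c) d

lemma pvSet_update_of_subset {α : Type} [BEq α] [LawfulBEq α]
    (s : PySem.Set α) (xs : List α) (h : ∀ x ∈ xs, x ∈ s) : PySem.Set.update s xs = s := by
  induction xs generalizing s with
  | nil => rfl
  | cons x xs ih =>
      have hx : PySem.Set.add s x = s := PySem.Set.add_of_mem (h x (by simp))
      show PySem.Set.update (PySem.Set.add s x) xs = s
      rw [hx]; exact ih s (fun y hy => h y (by simp [hy]))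

lemma pvFoldl_const {α β : Type} (l : List α) (x : β) :
    l.foldl (fun _ _ => x) x = x := by
  induction l with
  | nil => rfl
  | cons c l ih => exact ih

-- collapsing pass 3's inner scan over the length keys: on a Nodup list containing X,
-- the guarded fold acts exactly once
lemma pvFoldl_if_not_mem {κ β : Type} [BEq κ] [LawfulBEq κ]
    (lengths : List κ) (X : κ) (g : κ → β → β) (d : β) (hX : X ∉ lengths) :
    lengths.foldl (fun d' L => if X == L then g L d' else d') d = d := by
  induction lengths generalizing d with
  | nil => rfl
  | cons L ls ih =>
      have : (X == L) = false := by simp; rintro rfl; exact hX (by simp)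
      simp only [List.foldl_cons, this, Bool.false_eq_true, ite_false]
      exact ih d (fun h => hX (by simp [h]))

lemma pvFoldl_if_collapse {κ β : Type} [BEq κ] [LawfulBEq κ]
    (lengths : List κ) (X : κ) (g : κ → β → β) (d : β)
    (hnd : lengths.Nodup) (hX : X ∈ lengths) :
    lengths.foldl (fun d' L => if X == L then g L d' else d') d = g X d := by
  induction lengths generalizing d with
  | nil => cases hX
  | cons L ls ih =>
      rcases List.nodup_cons.mp hnd with ⟨hL, hnd'⟩
      by_cases h : X = L
      · subst h
        simp only [List.foldl_cons, beq_self_eq_true, ite_true]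
        exact pvFoldl_if_not_mem ls X g (g X d) hL
      · have hb : (X == L) = false := by simp [h]
        simp only [List.foldl_cons, hb, Bool.false_eq_true, ite_false]
        exact ih d hnd' (by rcases List.mem_cons.mp hX with h'|h'; exact absurd h' h; exact h')

-- abbreviations for this task's key / length / value
def pvL (conn : String) : Int := PySem.List.len (PySem.Str.split₀ conn)
def pvV (conn : String) : String := PySem.Str.lower conn

def pvInv (d : PySem.Dict String (PySem.Dict Int (PySem.Set String))) (l : List String) : Prop :=
  ∀ c ∈ l, (d.getD (pvFirstTok c) PySem.Dict.empty).keys.Nodup ∧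
           pvL c ∈ (d.getD (pvFirstTok c) PySem.Dict.empty).keys

-- pass 3 with its inner scan collapsed to a single nested modify (= pvStep of f₃)
def pvF3 (s : PySem.Set String) (c : String) : PySem.Set String := PySem.Set.add s (pvV c)
def pvG3 (inner : PySem.Dict Int (PySem.Set String)) (c : String) : PySem.Dict Int (PySem.Set String) :=
  inner.insert (pvL c) (pvF3 (inner.getD (pvL c) PySem.Set.empty) c)

lemma pvInv_preserved (d : PySem.Dict String (PySem.Dict Int (PySem.Set String)))
    (c : String) (l : List String) (H : pvInv d (c :: l)) :
    pvInv (pvStep pvFirstTok pvG3 PySem.Dict.empty d c) l := by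
  intro c' hc'
  have hc := H c (by simp)
  have hC' := H c' (by simp [hc'])
  by_cases h : pvFirstTok c' = pvFirstTok c
  · have hg : (pvStep pvFirstTok pvG3 PySem.Dict.empty d c).getD (pvFirstTok c') PySem.Dict.empty
        = pvG3 (d.getD (pvFirstTok c) PySem.Dict.empty) c := by
      simp [pvStep, h]
    have hkeys : (pvG3 (d.getD (pvFirstTok c) PySem.Dict.empty) c).keys
        = (d.getD (pvFirstTok c) PySem.Dict.empty).keys := by
      exact PySem.Dict.keys_insert_of_contains _ _
        ((PySem.Dict.contains_iff_mem_keys _ _).mpr hc.2)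
    rw [hg, hkeys]
    rw [h] at hC'
    exact hC'
  · have hg : (pvStep pvFirstTok pvG3 PySem.Dict.empty d c).getD (pvFirstTok c') PySem.Dict.empty
        = d.getD (pvFirstTok c') PySem.Dict.empty := by
      simp [pvStep, PySem.Dict.getD_insert, h]
    rw [hg]; exact hC'

lemma pvPass3_collapse (l : List String) (d : PySem.Dict String (PySem.Dict Int (PySem.Set String)))
    (H : pvInv d l) :
    l.foldl (fun d conn =>
      ((d.getD (pvFirstTok conn) PySem.Dict.empty).keys).foldl (fun d' connLength =>
          if PySem.List.len (PySem.Str.split₀ conn) == connLength then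
            d'.modify (pvFirstTok conn) PySem.Dict.empty
              (fun inner => inner.modify connLength PySem.Set.empty
                (fun s => PySem.Set.add s (PySem.Str.lower conn)))
          else d') d) d
    = l.foldl (pvStep pvFirstTok pvG3 PySem.Dict.empty) d := by
  induction l generalizing d with
  | nil => rfl
  | cons c l ih =>
      simp only [List.foldl_cons]
      have hc := H c (by simp)
      have hstep :
          ((d.getD (pvFirstTok c) PySem.Dict.empty).keys).foldl (fun d' connLength =>
            if PySem.List.len (PySem.Str.split₀ c) == connLength then
              d'.modify (pvFirstTok c) PySem.Dict.empty
                (fun inner => inner.modify connLength PySem.Set.empty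
                  (fun s => PySem.Set.add s (PySem.Str.lower c)))
            else d') d
          = pvStep pvFirstTok pvG3 PySem.Dict.empty d c := by
        exact pvFoldl_if_collapse ((d.getD (pvFirstTok c) PySem.Dict.empty).keys) (pvL c)
          (fun L d' => d'.modify (pvFirstTok c) PySem.Dict.empty
            (fun inner => inner.modify L PySem.Set.empty
              (fun s => PySem.Set.add s (PySem.Str.lower c)))) d hc.1 hc.2
      rw [hstep]
      exact ih _ (pvInv_preserved d c l H)

lemma pvG3_def : pvG3 = pvStep pvL pvF3 PySem.Set.empty := rfl

-- pass 2's per-key action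
def pvF2 (inner : PySem.Dict Int (PySem.Set String)) (c : String) : PySem.Dict Int (PySem.Set String) :=
  inner.insert (pvL c) PySem.Set.empty

lemma pvF2_def : pvF2 = pvStep pvL (fun _ _ => PySem.Set.empty) PySem.Set.empty := rfl

lemma pvSeed_keys (m : List String) :
    (m.foldl pvF2 PySem.Dict.empty).keys = PySem.Set.ofList (m.map pvL) := by
  rw [pvF2_def, keys_foldl_pvStep]; rfl

lemma pvSeed_getD (m : List String) (L0 : Int) :
    (m.foldl pvF2 PySem.Dict.empty).getD L0 PySem.Set.empty = PySem.Set.empty := by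
  rw [pvF2_def, getD_foldl_pvStep]
  rw [show (PySem.Dict.empty : PySem.Dict Int (PySem.Set String)).getD L0 PySem.Set.empty
        = PySem.Set.empty from rfl]
  exact pvFoldl_const _ _

-- the heart: the one-pass inner fold ignores pass 2's empty-set scaffold
lemma pvInner_eq (m : List String) :
    m.foldl pvG3 (m.foldl pvF2 PySem.Dict.empty) = m.foldl pvG3 PySem.Dict.empty := by
  have hkL : (m.foldl pvG3 (m.foldl pvF2 PySem.Dict.empty)).keys = PySem.Set.ofList (m.map pvL) := by
    rw [pvG3_def, keys_foldl_pvStep, pvSeed_keys]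
    exact pvSet_update_of_subset _ _ (fun x hx => (PySem.Set.mem_ofList _ _).mpr hx)
  have hkR : (m.foldl pvG3 PySem.Dict.empty).keys = PySem.Set.ofList (m.map pvL) := by
    rw [pvG3_def, keys_foldl_pvStep]; rfl
  have hndL : (m.foldl pvG3 (m.foldl pvF2 PySem.Dict.empty)).keys.Nodup := by
    rw [hkL]; exact PySem.Set.nodup_ofList _
  have hndR : (m.foldl pvG3 PySem.Dict.empty).keys.Nodup := by
    rw [hkR]; exact PySem.Set.nodup_ofList _
  apply PySem.Dict.ext
  rw [PySem.Dict.items_eq_map_keys _ hndL PySem.Set.empty,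
      PySem.Dict.items_eq_map_keys _ hndR PySem.Set.empty, hkL, hkR]
  apply List.map_congr_left
  intro L0 _
  rw [pvG3_def, getD_foldl_pvStep, getD_foldl_pvStep, pvSeed_getD,
    show (PySem.Dict.empty : PySem.Dict Int (PySem.Set String)).getD L0 PySem.Set.empty
      = PySem.Set.empty from rfl]

-- lookup of pass 1's scaffold: always the empty inner dict
lemma pvD1_getD (l : List String) (K : String) :
    (l.foldl (pvStep pvFirstTok (fun _ _ => (PySem.Dict.empty : PySem.Dict Int (PySem.Set String)))
        PySem.Dict.empty) PySem.Dict.empty).getD K PySem.Dict.empty = PySem.Dict.empty := by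
  rw [getD_foldl_pvStep]
  rw [show (PySem.Dict.empty : PySem.Dict String (PySem.Dict Int (PySem.Set String))).getD K
        PySem.Dict.empty = PySem.Dict.empty from rfl]
  exact pvFoldl_const _ _

-- lookup of pass 2's result: the seed dict of the K-group
lemma pvD2_getD (l : List String) (K : String) :
    (l.foldl (pvStep pvFirstTok pvF2 PySem.Dict.empty)
        (l.foldl (pvStep pvFirstTok (fun _ _ => (PySem.Dict.empty : PySem.Dict Int (PySem.Set String)))
          PySem.Dict.empty) PySem.Dict.empty)).getD K PySem.Dict.empty
      = (l.filter (fun c => pvFirstTok c == K)).foldl pvF2 PySem.Dict.empty := by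
  rw [getD_foldl_pvStep, pvD1_getD]

lemma pvInv_d2 (l : List String) :
    pvInv (l.foldl (pvStep pvFirstTok pvF2 PySem.Dict.empty)
        (l.foldl (pvStep pvFirstTok (fun _ _ => (PySem.Dict.empty : PySem.Dict Int (PySem.Set String)))
          PySem.Dict.empty) PySem.Dict.empty)) l := by
  intro c hc
  rw [pvD2_getD, pvSeed_keys]
  refine ⟨PySem.Set.nodup_ofList _, (PySem.Set.mem_ofList _ _).mpr ?_⟩
  exact List.mem_map_of_mem (List.mem_filter.mpr ⟨hc, by simp⟩)

-- both outer dicts coincide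
lemma pvOuter_eq (l : List String) :
    l.foldl (pvStep pvFirstTok pvG3 PySem.Dict.empty)
      (l.foldl (pvStep pvFirstTok pvF2 PySem.Dict.empty)
        (l.foldl (pvStep pvFirstTok (fun _ _ => (PySem.Dict.empty : PySem.Dict Int (PySem.Set String)))
          PySem.Dict.empty) PySem.Dict.empty))
    = l.foldl (pvStep pvFirstTok pvG3 PySem.Dict.empty) PySem.Dict.empty := by
  have hk1 : (l.foldl (pvStep pvFirstTok (fun _ _ => (PySem.Dict.empty : PySem.Dict Int (PySem.Set String)))
      PySem.Dict.empty) PySem.Dict.empty).keys = PySem.Set.ofList (l.map pvFirstTok) := by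
    rw [keys_foldl_pvStep]; rfl
  have hupd : ∀ (s : PySem.Set String), s = PySem.Set.ofList (l.map pvFirstTok) →
      PySem.Set.update s (l.map pvFirstTok) = PySem.Set.ofList (l.map pvFirstTok) := by
    rintro s rfl
    exact pvSet_update_of_subset _ _ (fun x hx => (PySem.Set.mem_ofList _ _).mpr hx)
  have hk2 : (l.foldl (pvStep pvFirstTok pvF2 PySem.Dict.empty)
      (l.foldl (pvStep pvFirstTok (fun _ _ => (PySem.Dict.empty : PySem.Dict Int (PySem.Set String)))
        PySem.Dict.empty) PySem.Dict.empty)).keys = PySem.Set.ofList (l.map pvFirstTok) := by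
    rw [keys_foldl_pvStep, hk1]; exact hupd _ rfl
  have hkL : (l.foldl (pvStep pvFirstTok pvG3 PySem.Dict.empty)
      (l.foldl (pvStep pvFirstTok pvF2 PySem.Dict.empty)
        (l.foldl (pvStep pvFirstTok (fun _ _ => (PySem.Dict.empty : PySem.Dict Int (PySem.Set String)))
          PySem.Dict.empty) PySem.Dict.empty))).keys = PySem.Set.ofList (l.map pvFirstTok) := by
    rw [keys_foldl_pvStep, hk2, hupd _ rfl]
  have hkR : (l.foldl (pvStep pvFirstTok pvG3 PySem.Dict.empty) PySem.Dict.empty).keys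
      = PySem.Set.ofList (l.map pvFirstTok) := by
    rw [keys_foldl_pvStep]; rfl
  have hndL := hkL ▸ PySem.Set.nodup_ofList (l.map pvFirstTok)
  have hndR := hkR ▸ PySem.Set.nodup_ofList (l.map pvFirstTok)
  apply PySem.Dict.ext
  rw [PySem.Dict.items_eq_map_keys _ hndL PySem.Dict.empty,
      PySem.Dict.items_eq_map_keys _ hndR PySem.Dict.empty, hkL, hkR]
  apply List.map_congr_left
  intro K _
  rw [getD_foldl_pvStep, getD_foldl_pvStep, pvD1_getD, getD_foldl_pvStep,
    show (PySem.Dict.empty : PySem.Dict String (PySem.Dict Int (PySem.Set String))).getD K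
        PySem.Dict.empty = PySem.Dict.empty from rfl, pvInner_eq]

-- ===== VERDICT (by name: the statement is the Claim_ definition above) =====
theorem make_sorted_connslex_py_spec : Claim_equal_make_sorted_connslex_py := by
  intro l _hdom _hpre
  show make_sorted_connslex_py l = make_sorted_connslex_py_alt l
  unfold make_sorted_connslex_py make_sorted_connslex_py_alt
  have hA3 :
      l.foldl (fun d conn =>
        ((d.getD (pvFirstTok conn) PySem.Dict.empty).keys).foldl (fun d' connLength =>
            if PySem.List.len (PySem.Str.split₀ conn) == connLength then
              d'.modify (pvFirstTok conn) PySem.Dict.empty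
                (fun inner => inner.modify connLength PySem.Set.empty
                  (fun s => PySem.Set.add s (PySem.Str.lower conn)))
            else d') d)
        (l.foldl (pvStep pvFirstTok pvF2 PySem.Dict.empty)
          (l.foldl (pvStep pvFirstTok (fun _ _ => (PySem.Dict.empty : PySem.Dict Int (PySem.Set String)))
            PySem.Dict.empty) PySem.Dict.empty))
      = l.foldl (pvStep pvFirstTok pvG3 PySem.Dict.empty) PySem.Dict.empty := by
    rw [pvPass3_collapse l _ (pvInv_d2 l)]
    exact pvOuter_eq l
  exact congrArg (fun d => d.items.map (fun p => (p.1, p.2.items))) hA3
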